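-- pv_equiv track=rewrite | github.com/MrEmgin/RimuruBot | bot.py | hex_from_string
-- ===== SOURCE A (Python) =====
-- def hex_from_string(s):
--     b = s.encode('utf-8')
--     h = b.hex()
--     data = []
--     for i in range(len(h)):
--         if i % 2 == 1:
--             data.append(h[i - 1:i + 1])
--     res = '%' + '%'.join(data)
--     return res
-- ===== SOURCE B (Python) =====
-- def hex_from_string(s):
--     return '%' + '%'.join(f'{byte:02x}' for byte in s.encode('utf-8'))
-- ===== Notes on version B (the rewrite author's own statement) =====
-- stated objective: idiomatic
-- what changed: B drops A's two-phase hex-then-rechunk logic (build the full hex string of the encoded bytes, loop over all its character indices, slice out a two-character chunk at every odd index) and instead formats each UTF-8 byte directly as a two-digit lowercase hex string, joining the per-byte strings with the percent separator.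
import Mathlib
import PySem

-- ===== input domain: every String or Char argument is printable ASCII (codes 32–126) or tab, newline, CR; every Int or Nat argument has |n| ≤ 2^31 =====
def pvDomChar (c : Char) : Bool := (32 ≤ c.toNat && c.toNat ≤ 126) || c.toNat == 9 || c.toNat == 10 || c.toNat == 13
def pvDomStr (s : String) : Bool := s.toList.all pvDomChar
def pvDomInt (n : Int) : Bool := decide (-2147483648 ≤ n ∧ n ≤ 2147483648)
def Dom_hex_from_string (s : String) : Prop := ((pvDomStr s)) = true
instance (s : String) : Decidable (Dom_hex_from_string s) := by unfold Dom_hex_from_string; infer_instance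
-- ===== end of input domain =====

-- B replaces A's hex-string-then-rechunk loop by direct per-byte two-hex-digit formatting (idiomatic).
-- On the ASCII domain, s.encode('utf-8') is one byte per character (the character's code point).

-- one lowercase hex digit (shared: models bytes.hex() / f'{b:02x}' digit production)
def hexDig (n : Nat) : Char := if n < 10 then Char.ofNat (48 + n) else Char.ofNat (87 + n)

-- the two lowercase hex digits of one byte
def bytePair (b : Nat) : List Char := [hexDig (b / 16), hexDig (b % 16)]

-- ===== PORT A =====
def hex_from_string (s : String) : String :=
  let b : List Nat := s.toList.map Char.toNat        -- s.encode('utf-8'): byte values (exact on the ASCII domain)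
  let h : List Char := b.flatMap bytePair            -- b.hex(): two lowercase hex digits per byte
  let data : List (List Char) :=
    (PySem.List.pyRange 0 (h.length : Int) 1).foldl
      (fun data i =>
        if PySem.Int.mod i 2 == 1 then data ++ [PySem.List.slice h (some (i - 1)) (some (i + 1))]
        else data) []
  String.ofList ('%' :: PySem.Chars.join ['%'] data) -- '%' + '%'.join(data)

-- ===== PORT B =====
def hex_from_string_alt (s : String) : String :=
  String.ofList ('%' :: PySem.Chars.join ['%'] (s.toList.map (fun c => bytePair c.toNat)))

-- ===== PRECONDITION & SPEC =====
def Spec_hex_from_string (s : String) (out : String) : Prop := out = hex_from_string_alt s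
instance (s : String) (out : String) : Decidable (Spec_hex_from_string s out) := by unfold Spec_hex_from_string; infer_instance

-- ===== CLAIM (what is proved, stated in full; the proofs are below) =====
def Claim_equal_hex_from_string : Prop := ∀ (s : String), Dom_hex_from_string s → Spec_hex_from_string s (hex_from_string s)

-- ===== LEMMAS AND PROOFS =====

-- A's loop body, named for the proofs (definitionally the lambda in the port)
def aBody (h : List Char) (data : List (List Char)) (i : Int) : List (List Char) :=
  if PySem.Int.mod i 2 == 1 then data ++ [PySem.List.slice h (some (i - 1)) (some (i + 1))]
  else data

lemma len_flat (bs : List Nat) : (bs.flatMap bytePair).length = 2 * bs.length := by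
  induction bs with
  | nil => rfl
  | cons b t ih => simp [List.flatMap_cons, bytePair, ih]; omega

lemma mod_eq (j : Int) : PySem.Int.mod j 2 = j % 2 := by
  simp [PySem.Int.mod, Int.fmod_eq_emod]

lemma slice_append_eq (xs t : List Char) (a b : Int) (ha : 0 ≤ a) (hb : 0 ≤ b)
    (hab : a ≤ b) (hble : b.toNat ≤ xs.length) :
    PySem.List.slice (xs ++ t) (some a) (some b) = PySem.List.slice xs (some a) (some b) := by
  rw [PySem.List.slice_toNat _ ha hb, PySem.List.slice_toNat _ ha hb]
  rw [List.drop_append_of_le_length (by omega)]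
  have hle : b.toNat - a.toNat ≤ (List.drop a.toNat xs).length := by
    rw [List.length_drop]; omega
  rw [List.take_append_of_le_length hle]

lemma aloop_flat (bs : List Nat) :
    (PySem.List.pyRange 0 ((bs.flatMap bytePair).length : Int) 1).foldl
      (aBody (bs.flatMap bytePair)) [] = bs.map bytePair := by
  induction bs using List.reverseRecOn with
  | nil => simp [PySem.List.pyRange_one_eq_nil]
  | append_singleton bs b ih =>
    have hflat : (bs ++ [b]).flatMap bytePair = bs.flatMap bytePair ++ bytePair b := by simp
    have hlen : ((bs.flatMap bytePair).length : Int) = 2 * (bs.length : Int) := by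
      rw [len_flat]; push_cast; ring
    have hlen2 : (((bs ++ [b]).flatMap bytePair).length : Int) = 2 * (bs.length : Int) + 2 := by
      rw [hflat]; simp only [List.length_append, bytePair, List.length_cons, List.length_nil]
      rw [len_flat]; push_cast; ring
    rw [hflat] at hlen2 ⊢
    set h := bs.flatMap bytePair with hh
    set n : Int := (bs.length : Int) with hn
    rw [hlen2,
        PySem.List.pyRange_one_append 0 (2 * n) (2 * n + 2) (by positivity) (by omega),
        List.foldl_append]
    -- first segment: the slices A takes there never reach beyond h, so the appended pair is invisible
    have hcongr : (PySem.List.pyRange 0 (2 * n)).foldl (aBody (h ++ bytePair b)) []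
        = (PySem.List.pyRange 0 (2 * n)).foldl (aBody h) [] := by
      apply PySem.List.foldl_congr_mem
      intro acc i hi
      rw [PySem.List.mem_pyRange_one] at hi
      unfold aBody
      rw [mod_eq]
      by_cases hodd : i % 2 = 1
      · rw [if_pos (by simp [hodd]), if_pos (by simp [hodd])]
        rw [slice_append_eq _ _ _ _ (by omega) (by omega) (by omega) (by omega)]
      · rw [if_neg (by simp [hodd]), if_neg (by simp [hodd])]
    have ih' : (PySem.List.pyRange 0 (2 * n)).foldl (aBody h) [] = bs.map bytePair := by
      rw [← hlen]; exact ih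
    rw [hcongr, ih']
    -- tail segment: [2n, 2n+1]; index 2n is even, index 2n+1 appends exactly bytePair b
    rw [PySem.List.pyRange_one_cons (by omega), PySem.List.pyRange_one_cons (by omega),
        PySem.List.pyRange_one_eq_nil (by omega)]
    simp only [List.foldl_cons, List.foldl_nil]
    have heven : aBody (h ++ bytePair b) (bs.map bytePair) (2 * n) = bs.map bytePair := by
      unfold aBody
      rw [mod_eq, if_neg (by simp)]
    have hstep : aBody (h ++ bytePair b) (bs.map bytePair) (2 * n + 1)
        = bs.map bytePair ++ [bytePair b] := by
      unfold aBody
      rw [mod_eq, if_pos (by simp)]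
      have e1 : (2 * n + 1 - 1 : Int) = 2 * n := by ring
      have e2 : (2 * n + 1 + 1 : Int) = 2 * n + 2 := by ring
      rw [e1, e2, PySem.List.slice_toNat _ (by positivity) (by omega)]
      have hhl : (2 * n : Int).toNat = h.length := by omega
      have e3 : (2 * n + 2 : Int).toNat - (2 * n : Int).toNat = 2 := by omega
      rw [e3, hhl, List.drop_left]
      have e4 : List.take 2 (bytePair b) = bytePair b := by simp [bytePair]
      rw [e4]
    rw [heven, hstep]
    simp

theorem hex_from_string_spec : Claim_equal_hex_from_string := by
  intro s _
  unfold Spec_hex_from_string hex_from_string hex_from_string_alt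
  have key := aloop_flat (s.toList.map Char.toNat)
  unfold aBody at key
  simp only [key, List.map_map]
  rfl
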